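-- pv_equiv track=rewrite | github.com/codemario318/Algorithm | python3/boj/10942_팰린드롬?.py | init_palindrome
-- ===== SOURCE A (Python) =====
-- def init_palindrome(n, arr):
--     p = [[None for _ in range(n + 1)] for _ in range(n + 1)]
--
--     for i in range(1, n):
--         p[i][i] = True
--         p[i][i + 1] = (arr[i] == arr[i + 1])
--
--     p[-1][-1] = True
--
--     for s in range(2, n + 1):
--         for i in range(1, n - s + 1):
--             p[i][i + s] = (p[i + 1][i + s - 1] and arr[i] == arr[i + s])
--
--     return p
-- ===== SOURCE B (Python) =====
-- def init_palindrome(n, arr):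
--     # expand-around-center; builds the same (n+1)x(n+1) True/False/None table
--     p = [[None] * (n + 1)] + [[None] * i + [False] * (n - i + 1) for i in range(1, n + 1)]
--     for c in range(1, n + 1):
--         l, r = c, c
--         while l >= 1 and r <= n and arr[l] == arr[r]:
--             p[l][r] = True
--             l -= 1
--             r += 1
--         l, r = c, c + 1
--         while l >= 1 and r <= n and arr[l] == arr[r]:
--             p[l][r] = True
--             l -= 1
--             r += 1
--     p[-1][-1] = True
--     return p
-- ===== Notes on version B (the rewrite author's own statement) =====
-- stated objective: faster
-- what changed: Replaces the length-by-length DP recurrence with expand-around-center: the table is pre-filled False on the upper triangle and each center's while-loop marks exactly the palindromic substrings True, stopping at the first mismatch; intended as faster (a timing run measured 3.2-6.8x at sizes where both finish; unconfirmed at the largest sizes, where both can time out on palindrome-heavy inputs).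
-- outside the precondition, e.g. on init_palindrome(1, []): A returns [[None, None], [None, True]], B raises IndexError
import Mathlib
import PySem

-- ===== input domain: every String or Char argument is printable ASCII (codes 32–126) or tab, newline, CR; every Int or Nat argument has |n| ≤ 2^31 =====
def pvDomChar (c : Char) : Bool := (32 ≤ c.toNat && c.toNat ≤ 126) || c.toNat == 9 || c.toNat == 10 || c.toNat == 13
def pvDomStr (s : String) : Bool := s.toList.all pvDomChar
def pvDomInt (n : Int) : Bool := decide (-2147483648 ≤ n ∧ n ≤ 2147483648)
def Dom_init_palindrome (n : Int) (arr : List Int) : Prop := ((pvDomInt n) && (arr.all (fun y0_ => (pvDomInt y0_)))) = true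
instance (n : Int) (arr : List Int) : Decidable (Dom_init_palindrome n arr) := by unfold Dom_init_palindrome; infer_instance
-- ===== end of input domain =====

-- B replaces the length-by-length DP recurrence by expand-around-center (intended as faster; a timing run measured 3.2-6.8x at sizes where both finish, unconfirmed at the largest sizes).

-- ===== PORT A =====
-- shared matrix helpers: Python's p[i][j] = v (read row, write cell, write row) and p[i][j] read,
-- with Python's negative-index rule via pyGet?/pySetD; the out-of-range (IndexError) cases are excluded by Pre_.
def pvSet2 (p : List (List (Option Bool))) (i j : Int) (v : Option Bool) : List (List (Option Bool)) :=
  match PySem.List.pyGet? p i with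
  | some row => PySem.List.pySetD p i (PySem.List.pySetD row j v)
  | none => p

def pvGet2 (p : List (List (Option Bool))) (i j : Int) : Option Bool :=
  match PySem.List.pyGet? p i with
  | some row => (PySem.List.pyGet? row j).getD none
  | none => none

-- Python's `x and b` for x : None/True/False and b a bool
def pvAnd (x : Option Bool) (b : Bool) : Option Bool :=
  match x with
  | some true => some b
  | some false => some false
  | none => none

-- literal port of A: None-table, first loop (diagonals 0 and 1), p[-1][-1] = True, then the DP loop over lengths s.
-- arr[i] is pyGet? arr i; the comparison `arr[i] == arr[i+1]` is exact whenever both indices are in range (Pre_).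
def init_palindrome (n : Int) (arr : List Int) : List (List (Option Bool)) :=
  let p0 := (PySem.List.pyRange 0 (n+1) 1).map (fun _ => (PySem.List.pyRange 0 (n+1) 1).map (fun _ => (none : Option Bool)))
  let p1 := (PySem.List.pyRange 1 n 1).foldl (fun p i =>
      pvSet2 (pvSet2 p i i (some true)) i (i+1)
        (some (PySem.List.pyGet? arr i == PySem.List.pyGet? arr (i+1)))) p0
  let p2 := pvSet2 p1 (-1) (-1) (some true)
  (PySem.List.pyRange 2 (n+1) 1).foldl (fun p s =>
      (PySem.List.pyRange 1 (n - s + 1) 1).foldl (fun p i =>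
        pvSet2 p i (i+s)
          (pvAnd (pvGet2 p (i+1) (i+s-1))
                 (PySem.List.pyGet? arr i == PySem.List.pyGet? arr (i+s)))) p) p2

-- ===== PORT B =====
-- the while-loop `while l >= 1 and r <= n and arr[l] == arr[r]: p[l][r] = True; l -= 1; r += 1`
def pvExpand (n : Int) (arr : List Int) (p : List (List (Option Bool))) (l r : Int) : List (List (Option Bool)) :=
  if h : 1 ≤ l ∧ r ≤ n ∧ (PySem.List.pyGet? arr l == PySem.List.pyGet? arr r) = true then
    pvExpand n arr (pvSet2 p l r (some true)) (l - 1) (r + 1)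
  else p
  termination_by l.toNat
  decreasing_by omega

-- literal port of B: row-built None/False table, expansion from every center (odd then even run), p[-1][-1] = True.
def init_palindrome_alt (n : Int) (arr : List Int) : List (List (Option Bool)) :=
  let p0 := [List.replicate (n+1).toNat (none : Option Bool)] ++
    (PySem.List.pyRange 1 (n+1) 1).map (fun i =>
      List.replicate i.toNat (none : Option Bool) ++ List.replicate (n - i + 1).toNat (some false))
  let p1 := (PySem.List.pyRange 1 (n+1) 1).foldl (fun p c =>
      pvExpand n arr (pvExpand n arr p c c) c (c+1)) p0
  pvSet2 p1 (-1) (-1) (some true)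

-- ===== PRECONDITION & SPEC =====
-- Pre_ excludes n < 0 (A raises IndexError on p[-1]) and 1 ≤ n with arr shorter than n+1: there A raises
-- IndexError for n ≥ 2, and for n = 1 it happens to return without ever reading arr while any
-- arr-reading reimplementation (B) raises IndexError — see claim.json "cites".
def Pre_init_palindrome (n : Int) (arr : List Int) : Prop :=
  0 ≤ n ∧ (n = 0 ∨ n + 1 ≤ (arr.length : Int))
instance (n : Int) (arr : List Int) : Decidable (Pre_init_palindrome n arr) := by unfold Pre_init_palindrome; infer_instance

def pvWitness_init_palindrome : Int × List Int := (3, [9, 1, 2, 1])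

def Spec_init_palindrome (n : Int) (arr : List Int) (out : List (List (Option Bool))) : Prop := out = init_palindrome_alt n arr
instance (n : Int) (arr : List Int) (out : List (List (Option Bool))) : Decidable (Spec_init_palindrome n arr out) := by unfold Spec_init_palindrome; infer_instance

-- ===== CLAIM (what is proved, stated in full; the proofs are below) =====
def Claim_equal_init_palindrome : Prop := ∀ (n : Int) (arr : List Int), Dom_init_palindrome n arr → Pre_init_palindrome n arr → Spec_init_palindrome n arr (init_palindrome n arr)

-- ===== LEMMAS AND PROOFS =====

-- cell read with Nat indices and default none (out-of-range rows/cells read as none)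
def pvg (p : List (List (Option Bool))) (i j : Nat) : Option Bool := (p.getD i []).getD j none

-- (N+1) x (N+1) matrix shape
def pvShape (N : Nat) (p : List (List (Option Bool))) : Prop :=
  p.length = N + 1 ∧ ∀ k : Nat, k < N + 1 → (p.getD k []).length = N + 1

-- the guard of B's while loop
def pvG (n : Int) (arr : List Int) (u v : Int) : Bool :=
  decide (1 ≤ u) && decide (v ≤ n) && (PySem.List.pyGet? arr u == PySem.List.pyGet? arr v)

-- k consecutive guard successes starting at (l, r) moving outward
def pvChain (n : Int) (arr : List Int) (l r : Int) : Nat → Bool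
  | 0 => true
  | (k+1) => pvG n arr l r && pvChain n arr (l-1) (r+1) k

-- cell (a,b) is written by the run starting at (l,r)
def pvCov (n : Int) (arr : List Int) (l r : Int) (a b : Nat) : Bool :=
  decide ((a : Int) + b = l + r) && decide ((a : Int) ≤ l) && pvChain n arr l r ((l - a).toNat + 1)

-- cell (a,b) is written by center c (odd or even run)
def pvCovC (n : Int) (arr : List Int) (c : Int) (a b : Nat) : Bool :=
  pvCov n arr c (c+1) a b || pvCov n arr c c a b

-- the palindrome truth value A's DP computes
def pvPal (arr : List Int) (i j : Nat) : Bool :=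
  if j ≤ i then true
  else pvPal arr (i+1) (j-1) && (PySem.List.pyGet? arr (i : Int) == PySem.List.pyGet? arr (j : Int))
  termination_by j - i

-- the common final table, cellwise
def pvCell (arr : List Int) (N a b : Nat) : Option Bool :=
  if (1 ≤ a ∧ a ≤ b ∧ b ≤ N) ∨ (a = N ∧ b = N) then some (pvPal arr a b) else none

-- A's table after processing lengths < S
def pvCellUpto (arr : List Int) (N S a b : Nat) : Option Bool :=
  if ((1 ≤ a ∧ a ≤ b ∧ b ≤ N) ∧ b - a < S) ∨ (a = N ∧ b = N) then some (pvPal arr a b) else none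

-- ---- generic matrix lemmas ----

lemma getD_set_list {α : Type} (p : List α) (i a : Nat) (r : α) (d : α) :
    (p.set i r).getD a d = if i = a ∧ i < p.length then r else p.getD a d := by
  by_cases h1 : i = a
  · subst h1
    by_cases h2 : i < p.length
    · simp [List.getD_eq_getElem?_getD, h2]
    · simp [List.getD_eq_getElem?_getD, h2]
  · simp [List.getD_eq_getElem?_getD, h1]

lemma pvSet2_int (p : List (List (Option Bool))) (i j : Int) (v : Option Bool)
    (hi0 : 0 ≤ i) (hil : i < (p.length : Int)) :
    pvSet2 p i j v = p.set i.toNat (PySem.List.pySetD (p.getD i.toNat []) j v) := by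
  have h : i.toNat < p.length := by omega
  have h1 : PySem.List.pyGet? p i = some (p.getD i.toNat []) := by
    rw [PySem.List.pyGet?_of_nonneg p hi0]
    simp [List.getElem?_eq_getElem h, List.getD_eq_getElem?_getD]
  rw [pvSet2, h1]
  show PySem.List.pySetD p i (PySem.List.pySetD (p.getD i.toNat []) j v) = _
  rw [PySem.List.pySetD_of_nonneg p _ hi0]

lemma g_pvSet2_int (p : List (List (Option Bool))) (i j : Int) (v : Option Bool)
    (hi0 : 0 ≤ i) (hil : i < (p.length : Int)) (hj0 : 0 ≤ j)
    (hjl : j < ((p.getD i.toNat []).length : Int)) (a b : Nat) :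
    pvg (pvSet2 p i j v) a b = if (a : Int) = i ∧ (b : Int) = j then v else pvg p a b := by
  have hlen : i.toNat < p.length := by omega
  have hrow : j.toNat < (p.getD i.toNat []).length := by omega
  rw [pvSet2_int p i j v hi0 hil, PySem.List.pySetD_of_nonneg _ _ hj0]
  rw [pvg, pvg, getD_set_list]
  by_cases hai : (a : Int) = i
  · have ha' : i.toNat = a := by omega
    rw [if_pos ⟨ha', by omega⟩, getD_set_list]
    by_cases hbj : (b : Int) = j
    · have hb' : j.toNat = b := by omega
      rw [if_pos ⟨hb', by omega⟩, if_pos ⟨hai, hbj⟩]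
    · rw [if_neg (by intro hc; exact hbj (by omega)), if_neg (by intro hc; exact hbj hc.2), ha']
  · rw [if_neg (by intro hc; exact hai (by omega)), if_neg (by intro hc; exact hai hc.1)]

lemma length_pvSet2 (p : List (List (Option Bool))) (i j : Int) (v : Option Bool) :
    (pvSet2 p i j v).length = p.length := by
  rw [pvSet2]
  cases h : PySem.List.pyGet? p i
  · rfl
  · simp [PySem.List.length_pySetD]

lemma shape_pvSet2 {N : Nat} (p : List (List (Option Bool))) (i j : Int) (v : Option Bool)
    (hp : pvShape N p) : pvShape N (pvSet2 p i j v) := by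
  obtain ⟨hl, hr⟩ := hp
  refine ⟨by rw [length_pvSet2, hl], ?_⟩
  intro k hk
  rw [pvSet2]
  cases hg : PySem.List.pyGet? p i with
  | none => exact hr k hk
  | some row =>
    have hrowlen : row.length = N + 1 := by
      obtain ⟨k1, hk1, he⟩ := List.mem_iff_getElem.mp (PySem.List.mem_of_pyGet?_eq_some p hg)
      have h2 := hr k1 (by omega)
      rw [List.getD_eq_getElem?_getD, List.getElem?_eq_getElem hk1] at h2
      rw [← he]
      simpa using h2
    simp only [PySem.List.pySetD, PySem.List.pySet?]
    cases hidx : PySem.List.pyIdx? p.length i with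
    | none => simpa using hr k hk
    | some k0 =>
      simp only [Option.map_some, Option.getD_some]
      rw [getD_set_list]
      split_ifs with hc
      · cases hidx2 : PySem.List.pyIdx? row.length j <;> simp [hrowlen]
      · exact hr k hk

lemma corner_pvSet2 {N : Nat} (p : List (List (Option Bool))) (hp : pvShape N p) (a b : Nat) :
    pvg (pvSet2 p (-1) (-1) (some true)) a b = if a = N ∧ b = N then some true else pvg p a b := by
  obtain ⟨hl, hrows⟩ := hp
  have hNrow : (p.getD N []).length = N + 1 := hrows N (by omega)
  have hidx : PySem.List.pyIdx? (N+1) (-1) = some N := by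
    simp only [PySem.List.pyIdx?]
    rw [if_neg (by norm_num), if_pos (by push_cast; omega)]
    norm_num
  have hlast : PySem.List.pyGet? p (-1) = some (p.getD N []) := by
    rw [PySem.List.pyGet?_neg_one, List.getLast?_eq_getElem?, hl]
    simp only [Nat.add_sub_cancel]
    rw [List.getElem?_eq_getElem (by omega), List.getD_eq_getElem?_getD,
      List.getElem?_eq_getElem (by omega)]
    simp
  have hsetrow : PySem.List.pySetD (p.getD N []) (-1) (some true) = (p.getD N []).set N (some true) := by
    simp only [PySem.List.pySetD, PySem.List.pySet?, hNrow, hidx]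
    simp
  have hsetp : ∀ r : List (Option Bool), PySem.List.pySetD p (-1) r = p.set N r := by
    intro r
    simp only [PySem.List.pySetD, PySem.List.pySet?, hl, hidx]
    simp
  rw [pvSet2, hlast]
  show pvg (PySem.List.pySetD p (-1) (PySem.List.pySetD (p.getD N []) (-1) (some true))) a b = _
  rw [hsetrow, hsetp, pvg, pvg, getD_set_list]
  by_cases ha : a = N
  · rw [if_pos ⟨ha.symm, by omega⟩, getD_set_list]
    by_cases hb : b = N
    · rw [if_pos ⟨hb.symm, by omega⟩, if_pos ⟨ha, hb⟩]
    · rw [if_neg (fun hc => hb hc.1.symm), if_neg (fun hc => hb hc.2), ha]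
  · rw [if_neg (fun hc => ha hc.1.symm), if_neg (fun hc => ha hc.1)]

lemma pvGet2_eq_g (p : List (List (Option Bool))) (i j : Int) (hi : 0 ≤ i) (hj : 0 ≤ j) :
    pvGet2 p i j = pvg p i.toNat j.toNat := by
  rw [pvGet2, pvg]
  rcases Nat.lt_or_ge i.toNat p.length with h | h
  · have h1 : PySem.List.pyGet? p i = some (p.getD i.toNat []) := by
      rw [PySem.List.pyGet?_of_nonneg p hi]
      simp [List.getElem?_eq_getElem h, List.getD_eq_getElem?_getD]
    rw [h1]
    show (PySem.List.pyGet? (p.getD i.toNat []) j).getD none = _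
    rw [PySem.List.pyGet?_of_nonneg _ hj]
    simp [List.getD_eq_getElem?_getD]
  · have h1 : PySem.List.pyGet? p i = none := by
      rw [PySem.List.pyGet?_of_nonneg p hi, List.getElem?_eq_none h]
    rw [h1]
    show (none : Option Bool) = _
    rw [List.getD_eq_getElem?_getD (l := p), List.getElem?_eq_none h]
    simp

lemma pvPal_pairs (arr : List Int) (i j : Nat) :
    pvPal arr i j = true ↔ ∀ u v : Nat, i ≤ u → u ≤ v → v ≤ j → u + v = i + j →
      (PySem.List.pyGet? arr (u : Int) == PySem.List.pyGet? arr (v : Int)) = true := by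
  fun_induction pvPal arr i j with
  | case1 i j h =>
    constructor
    · intro _ u v hu huv hv hsum
      have huv2 : u = v := by omega
      subst huv2
      simp
    · intro _
      rfl
  | case2 i j h ih =>
    rw [Bool.and_eq_true, ih]
    constructor
    · rintro ⟨hin, hend⟩ u v hu huv hv hsum
      by_cases hui : u = i
      · have hvj : v = j := by omega
        subst hui; subst hvj
        exact hend
      · exact hin u v (by omega) huv (by omega) (by omega)
    · intro hall
      exact ⟨fun u v hu huv hv hsum => hall u v (by omega) huv (by omega) (by omega),
        hall i j (le_refl _) (by omega) (le_refl _) rfl⟩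

lemma pvChain_iff (n : Int) (arr : List Int) (l r : Int) (k : Nat) :
    pvChain n arr l r k = true ↔ ∀ t : Nat, t < k → pvG n arr (l - t) (r + t) = true := by
  induction k generalizing l r with
  | zero => simp [pvChain]
  | succ k ih =>
    rw [pvChain, Bool.and_eq_true, ih]
    constructor
    · rintro ⟨h1, h2⟩ t ht
      cases t with
      | zero => simpa using h1
      | succ t =>
        have h3 := h2 t (by omega)
        have e1 : l - 1 - (t : Int) = l - ((t : Nat) + 1 : Nat) := by push_cast; ring
        have e2 : r + 1 + (t : Int) = r + ((t : Nat) + 1 : Nat) := by push_cast; ring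
        rwa [e1, e2] at h3
    · intro h
      refine ⟨by simpa using h 0 (by omega), fun t ht => ?_⟩
      have h3 := h (t+1) (by omega)
      have e1 : l - 1 - (t : Int) = l - ((t : Nat) + 1 : Nat) := by push_cast; ring
      have e2 : r + 1 + (t : Int) = r + ((t : Nat) + 1 : Nat) := by push_cast; ring
      rw [e1, e2]
      exact h3

lemma loop1_spec (n : Int) (arr : List Int) (N : Nat) (hn : n = (N : Int)) :
    ∀ (k : Int) (p : List (List (Option Bool))), 1 ≤ k → pvShape N p →
      pvShape N ((PySem.List.pyRange k n 1).foldl (fun p i =>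
        pvSet2 (pvSet2 p i i (some true)) i (i+1)
          (some (PySem.List.pyGet? arr i == PySem.List.pyGet? arr (i+1)))) p) ∧
      ∀ a b : Nat, pvg ((PySem.List.pyRange k n 1).foldl (fun p i =>
        pvSet2 (pvSet2 p i i (some true)) i (i+1)
          (some (PySem.List.pyGet? arr i == PySem.List.pyGet? arr (i+1)))) p) a b =
        if k ≤ (a : Int) ∧ (a : Int) < n ∧ (b = a ∨ b = a + 1) then
          (if b = a then some true else some (PySem.List.pyGet? arr (a : Int) == PySem.List.pyGet? arr ((a : Int)+1)))
        else pvg p a b := by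
  intro k p
  induction hm : (n - k).toNat using Nat.strong_induction_on generalizing k p with
  | _ m ih =>
  intro hk hp
  by_cases hkn : n ≤ k
  · rw [PySem.List.pyRange_one_eq_nil hkn]
    refine ⟨hp, fun a b => ?_⟩
    rw [List.foldl_nil, if_neg]
    rintro ⟨h1, h2, h3⟩
    omega
  · have hkn' : k < n := lt_of_not_ge hkn
    rw [PySem.List.pyRange_one_cons hkn', List.foldl_cons]
    have hs1 : pvShape N (pvSet2 p k k (some true)) := shape_pvSet2 _ _ _ _ hp
    have hs2 : pvShape N (pvSet2 (pvSet2 p k k (some true)) k (k+1)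
        (some (PySem.List.pyGet? arr k == PySem.List.pyGet? arr (k+1)))) := shape_pvSet2 _ _ _ _ hs1
    obtain ⟨hsF, hcF⟩ := ih (n - (k+1)).toNat (by omega) (k+1) _ rfl (by omega) hs2
    refine ⟨hsF, fun a b => ?_⟩
    rw [hcF a b]
    have hg2 : ∀ a b : Nat, pvg (pvSet2 (pvSet2 p k k (some true)) k (k+1)
        (some (PySem.List.pyGet? arr k == PySem.List.pyGet? arr (k+1)))) a b =
        if (a : Int) = k ∧ (b : Int) = k + 1 then
          some (PySem.List.pyGet? arr k == PySem.List.pyGet? arr (k+1))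
        else if (a : Int) = k ∧ (b : Int) = k then some true else pvg p a b := by
      intro a b
      rw [g_pvSet2_int _ _ _ _ (by omega) (by rw [hs1.1]; omega) (by omega)
        (by rw [hs1.2 k.toNat (by omega)]; omega)]
      rw [g_pvSet2_int _ _ _ _ (by omega) (by rw [hp.1]; omega) (by omega)
        (by rw [hp.2 k.toNat (by omega)]; omega)]
    by_cases hcond : (k + 1 ≤ (a : Int) ∧ (a : Int) < n ∧ (b = a ∨ b = a + 1))
    · rw [if_pos hcond,
        if_pos (show k ≤ (a : Int) ∧ (a : Int) < n ∧ (b = a ∨ b = a + 1) from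
          ⟨by omega, hcond.2.1, hcond.2.2⟩)]
    · rw [if_neg hcond, hg2 a b]
      by_cases hab1 : (a : Int) = k ∧ (b : Int) = k + 1
      · rw [if_pos hab1,
          if_pos (show k ≤ (a : Int) ∧ (a : Int) < n ∧ (b = a ∨ b = a + 1) from
            ⟨by omega, by omega, Or.inr (by omega)⟩),
          if_neg (show ¬ b = a by omega), ← hab1.1]
      · by_cases hab2 : (a : Int) = k ∧ (b : Int) = k
        · rw [if_neg hab1, if_pos hab2,
            if_pos (show k ≤ (a : Int) ∧ (a : Int) < n ∧ (b = a ∨ b = a + 1) from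
              ⟨by omega, by omega, Or.inl (by omega)⟩),
            if_pos (show b = a by omega)]
        · rw [if_neg hab1, if_neg hab2, if_neg]
          rintro ⟨h1, h2, h3 | h3⟩
          · have hak : (a : Int) = k := by
              by_contra hne
              exact hcond ⟨by omega, h2, Or.inl h3⟩
            exact hab2 ⟨hak, by omega⟩
          · have hak : (a : Int) = k := by
              by_contra hne
              exact hcond ⟨by omega, h2, Or.inr h3⟩
            exact hab1 ⟨hak, by omega⟩

lemma inner_spec (n : Int) (arr : List Int) (N : Nat) (hn : n = (N : Int)) (s : Int) (hs : 2 ≤ s) :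
    ∀ (k : Int) (p : List (List (Option Bool))), 1 ≤ k → pvShape N p →
      pvShape N ((PySem.List.pyRange k (n - s + 1) 1).foldl (fun p i =>
        pvSet2 p i (i+s)
          (pvAnd (pvGet2 p (i+1) (i+s-1))
                 (PySem.List.pyGet? arr i == PySem.List.pyGet? arr (i+s)))) p) ∧
      ∀ a b : Nat, pvg ((PySem.List.pyRange k (n - s + 1) 1).foldl (fun p i =>
        pvSet2 p i (i+s)
          (pvAnd (pvGet2 p (i+1) (i+s-1))
                 (PySem.List.pyGet? arr i == PySem.List.pyGet? arr (i+s)))) p) a b =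
        if k ≤ (a : Int) ∧ (a : Int) + s ≤ n ∧ (b : Int) = (a : Int) + s then
          pvAnd (pvg p (a+1) (b-1)) (PySem.List.pyGet? arr (a : Int) == PySem.List.pyGet? arr (b : Int))
        else pvg p a b := by
  intro k p
  induction hm : (n - s + 1 - k).toNat using Nat.strong_induction_on generalizing k p with
  | _ m ih =>
  intro hk hp
  by_cases hkn : n - s + 1 ≤ k
  · rw [PySem.List.pyRange_one_eq_nil hkn]
    refine ⟨hp, fun a b => ?_⟩
    rw [List.foldl_nil, if_neg]
    rintro ⟨h1, h2, h3⟩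
    omega
  · have hkn' : k < n - s + 1 := lt_of_not_ge hkn
    rw [PySem.List.pyRange_one_cons hkn', List.foldl_cons]
    have hs2 : pvShape N (pvSet2 p k (k+s)
        (pvAnd (pvGet2 p (k+1) (k+s-1))
               (PySem.List.pyGet? arr k == PySem.List.pyGet? arr (k+s)))) := shape_pvSet2 _ _ _ _ hp
    obtain ⟨hsF, hcF⟩ := ih (n - s + 1 - (k+1)).toNat (by omega) (k+1) _ rfl (by omega) hs2
    refine ⟨hsF, fun a b => ?_⟩
    rw [hcF a b]
    have hg2 : ∀ a b : Nat, pvg (pvSet2 p k (k+s)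
        (pvAnd (pvGet2 p (k+1) (k+s-1))
               (PySem.List.pyGet? arr k == PySem.List.pyGet? arr (k+s)))) a b =
        if (a : Int) = k ∧ (b : Int) = k + s then
          pvAnd (pvGet2 p (k+1) (k+s-1))
               (PySem.List.pyGet? arr k == PySem.List.pyGet? arr (k+s))
        else pvg p a b := by
      intro a b
      rw [g_pvSet2_int _ _ _ _ (by omega) (by rw [hp.1]; omega) (by omega)
        (by rw [hp.2 k.toNat (by omega)]; omega)]
    by_cases hcond : (k + 1 ≤ (a : Int) ∧ (a : Int) + s ≤ n ∧ (b : Int) = (a : Int) + s)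
    · rw [if_pos hcond,
        if_pos (show k ≤ (a : Int) ∧ (a : Int) + s ≤ n ∧ (b : Int) = (a : Int) + s from
          ⟨by omega, hcond.2.1, hcond.2.2⟩)]
      rw [hg2 (a+1) (b-1), if_neg (by rintro ⟨h1, h2⟩; omega)]
    · rw [if_neg hcond, hg2 a b]
      by_cases haab : (a : Int) = k ∧ (b : Int) = k + s
      · rw [if_pos haab,
          if_pos (show k ≤ (a : Int) ∧ (a : Int) + s ≤ n ∧ (b : Int) = (a : Int) + s from
            ⟨by omega, by omega, by omega⟩)]
        rw [pvGet2_eq_g _ _ _ (by omega) (by omega),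
          show (k+1).toNat = a + 1 from by omega,
          show (k+s-1).toNat = b - 1 from by omega,
          show (k : Int) = (a : Int) from by omega,
          show ((a : Int) + s) = (b : Int) from by omega]
      · rw [if_neg haab, if_neg]
        rintro ⟨h1, h2, h3⟩
        have hak : (a : Int) = k := by
          by_contra hne
          exact hcond ⟨by omega, h2, h3⟩
        exact haab ⟨hak, by omega⟩

lemma pvAnd_some (x c : Bool) : pvAnd (some x) c = some (x && c) := by
  cases x <;> rfl

lemma pvPal_self (arr : List Int) (i : Nat) : pvPal arr i i = true := by
  rw [pvPal]
  simp

lemma pvPal_adj (arr : List Int) (i : Nat) :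
    pvPal arr i (i+1) = (PySem.List.pyGet? arr (i : Int) == PySem.List.pyGet? arr ((i : Int) + 1)) := by
  rw [pvPal, if_neg (by omega)]
  have h1 : i + 1 - 1 = i := by omega
  rw [h1, show pvPal arr (i+1) i = true from by rw [pvPal]; simp, Bool.true_and]
  push_cast
  rfl

lemma getD_map_const_none {α : Type} (l : List α) (b : Nat) :
    ((l.map (fun _ => (none : Option Bool))).getD b none) = none := by
  rw [List.getD_eq_getElem?_getD, List.getElem?_map]
  cases l[b]? <;> rfl

lemma getD_map_const {α β : Type} (l : List α) (R : β) (k : Nat) (d : β) :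
    ((l.map (fun _ => R)).getD k d) = if k < l.length then R else d := by
  rw [List.getD_eq_getElem?_getD, List.getElem?_map]
  by_cases h : k < l.length
  · rw [List.getElem?_eq_getElem h, if_pos h]
    rfl
  · rw [List.getElem?_eq_none (by omega), if_neg h]
    rfl

lemma pvCellUpto_top (arr : List Int) (N a b : Nat) :
    pvCellUpto arr N (N+1) a b = pvCell arr N a b := by
  rw [pvCellUpto, pvCell]
  by_cases htri : 1 ≤ a ∧ a ≤ b ∧ b ≤ N
  · rw [if_pos (Or.inl ⟨htri, by omega⟩), if_pos (Or.inl htri)]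
  · by_cases hc : a = N ∧ b = N
    · rw [if_pos (Or.inr hc), if_pos (Or.inr hc)]
    · rw [if_neg (by rintro (⟨h1, _⟩ | h2); exacts [htri h1, hc h2]),
        if_neg (by rintro (h1 | h2); exacts [htri h1, hc h2])]

lemma outer_spec (n : Int) (arr : List Int) (N : Nat) (hn : n = (N : Int)) :
    ∀ (S : Int) (p : List (List (Option Bool))), 2 ≤ S → pvShape N p →
      (∀ a b : Nat, pvg p a b = pvCellUpto arr N S.toNat a b) →
      pvShape N ((PySem.List.pyRange S (n+1) 1).foldl (fun p s =>
        (PySem.List.pyRange 1 (n - s + 1) 1).foldl (fun p i =>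
          pvSet2 p i (i+s)
            (pvAnd (pvGet2 p (i+1) (i+s-1))
                   (PySem.List.pyGet? arr i == PySem.List.pyGet? arr (i+s)))) p) p) ∧
      ∀ a b : Nat, pvg ((PySem.List.pyRange S (n+1) 1).foldl (fun p s =>
        (PySem.List.pyRange 1 (n - s + 1) 1).foldl (fun p i =>
          pvSet2 p i (i+s)
            (pvAnd (pvGet2 p (i+1) (i+s-1))
                   (PySem.List.pyGet? arr i == PySem.List.pyGet? arr (i+s)))) p) p) a b =
        pvCellUpto arr N (n.toNat + 1) a b := by
  intro S p
  induction hm : (n + 1 - S).toNat using Nat.strong_induction_on generalizing S p with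
  | _ m ih =>
  intro hS hp hcells
  by_cases hSn : n + 1 ≤ S
  · rw [PySem.List.pyRange_one_eq_nil hSn]
    refine ⟨hp, fun a b => ?_⟩
    rw [List.foldl_nil, hcells a b, pvCellUpto, pvCellUpto]
    by_cases htri : 1 ≤ a ∧ a ≤ b ∧ b ≤ N
    · rw [if_pos (Or.inl ⟨htri, by omega⟩), if_pos (Or.inl ⟨htri, by omega⟩)]
    · by_cases hc : a = N ∧ b = N
      · rw [if_pos (Or.inr hc), if_pos (Or.inr hc)]
      · rw [if_neg (by rintro (⟨h1, _⟩ | h2); exacts [htri h1, hc h2]),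
          if_neg (by rintro (⟨h1, _⟩ | h2); exacts [htri h1, hc h2])]
  · have hSn' : S < n + 1 := lt_of_not_ge hSn
    rw [PySem.List.pyRange_one_cons hSn', List.foldl_cons]
    obtain ⟨hsI, hcI⟩ := inner_spec n arr N hn S hS 1 p (by norm_num) hp
    have hnew : ∀ a b : Nat, pvg ((PySem.List.pyRange 1 (n - S + 1) 1).foldl (fun p i =>
        pvSet2 p i (i+S)
          (pvAnd (pvGet2 p (i+1) (i+S-1))
                 (PySem.List.pyGet? arr i == PySem.List.pyGet? arr (i+S)))) p) a b =
        pvCellUpto arr N (S+1).toNat a b := by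
      intro a b
      rw [hcI a b, show (S+1).toNat = S.toNat + 1 from by omega]
      by_cases hcond : 1 ≤ (a : Int) ∧ (a : Int) + S ≤ n ∧ (b : Int) = (a : Int) + S
      · rw [if_pos hcond, hcells (a+1) (b-1), pvCellUpto,
          if_pos (Or.inl ⟨⟨by omega, by omega, by omega⟩, by omega⟩), pvAnd_some, pvCellUpto,
          if_pos (Or.inl ⟨⟨by omega, by omega, by omega⟩, by omega⟩)]
        congr 1
        conv_rhs => rw [pvPal]
        rw [if_neg (by omega)]
      · rw [if_neg hcond, hcells a b, pvCellUpto, pvCellUpto]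
        by_cases htri : 1 ≤ a ∧ a ≤ b ∧ b ≤ N
        · by_cases hlt : b - a < S.toNat
          · rw [if_pos (Or.inl ⟨htri, hlt⟩), if_pos (Or.inl ⟨htri, by omega⟩)]
          · rw [if_neg (by rintro (⟨h1, h2⟩ | h2); exacts [hlt h2, by omega]),
              if_neg (by
                rintro (⟨h1, h2⟩ | h2)
                · exact hcond ⟨by omega, by omega, by omega⟩
                · omega)]
        · by_cases hc : a = N ∧ b = N
          · rw [if_pos (Or.inr hc), if_pos (Or.inr hc)]
          · rw [if_neg (by rintro (⟨h1, _⟩ | h2); exacts [htri h1, hc h2]),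
              if_neg (by rintro (⟨h1, _⟩ | h2); exacts [htri h1, hc h2])]
    exact ih (n + 1 - (S+1)).toNat (by omega) (S+1) _ rfl (by omega) hsI hnew

lemma A_cells (n : Int) (arr : List Int) (N : Nat) (hn : n = (N : Int)) (hN : 1 ≤ N) :
    pvShape N (init_palindrome n arr) ∧
    ∀ a b : Nat, pvg (init_palindrome n arr) a b = pvCell arr N a b := by
  have hL : (PySem.List.pyRange 0 (n+1) 1).length = N + 1 := by
    rw [PySem.List.length_pyRange_one]
    omega
  have hshape0 : pvShape N ((PySem.List.pyRange 0 (n+1) 1).map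
      (fun _ => (PySem.List.pyRange 0 (n+1) 1).map (fun _ => (none : Option Bool)))) := by
    refine ⟨by rw [List.length_map, hL], fun k hk => ?_⟩
    rw [getD_map_const, if_pos (by omega), List.length_map, hL]
  have hcell0 : ∀ a b : Nat, pvg ((PySem.List.pyRange 0 (n+1) 1).map
      (fun _ => (PySem.List.pyRange 0 (n+1) 1).map (fun _ => (none : Option Bool)))) a b = none := by
    intro a b
    rw [pvg, getD_map_const]
    by_cases ha : a < (PySem.List.pyRange 0 (n+1) 1).length
    · rw [if_pos ha, getD_map_const_none]
    · rw [if_neg ha]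
      rfl
  obtain ⟨hs1, hc1⟩ := loop1_spec n arr N hn 1 _ (le_refl 1) hshape0
  have hs2 : pvShape N (pvSet2 ((PySem.List.pyRange 1 n 1).foldl (fun p i =>
      pvSet2 (pvSet2 p i i (some true)) i (i+1)
        (some (PySem.List.pyGet? arr i == PySem.List.pyGet? arr (i+1))))
      ((PySem.List.pyRange 0 (n+1) 1).map
        (fun _ => (PySem.List.pyRange 0 (n+1) 1).map (fun _ => (none : Option Bool)))))
      (-1) (-1) (some true)) := shape_pvSet2 _ _ _ _ hs1
  have hc2 : ∀ a b : Nat, pvg (pvSet2 ((PySem.List.pyRange 1 n 1).foldl (fun p i =>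
      pvSet2 (pvSet2 p i i (some true)) i (i+1)
        (some (PySem.List.pyGet? arr i == PySem.List.pyGet? arr (i+1))))
      ((PySem.List.pyRange 0 (n+1) 1).map
        (fun _ => (PySem.List.pyRange 0 (n+1) 1).map (fun _ => (none : Option Bool)))))
      (-1) (-1) (some true)) a b = pvCellUpto arr N 2 a b := by
    intro a b
    rw [corner_pvSet2 _ hs1 a b]
    by_cases hcn : a = N ∧ b = N
    · rw [if_pos hcn, pvCellUpto, if_pos (Or.inr hcn), hcn.1, hcn.2, pvPal_self]
    · rw [if_neg hcn, hc1 a b]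
      by_cases hcond : 1 ≤ (a : Int) ∧ (a : Int) < n ∧ (b = a ∨ b = a + 1)
      · rw [if_pos hcond]
        rcases hcond.2.2 with hb | hb
        · rw [if_pos hb, pvCellUpto,
            if_pos (Or.inl ⟨⟨by omega, by omega, by omega⟩, by omega⟩), hb, pvPal_self]
        · rw [if_neg (by omega), pvCellUpto,
            if_pos (Or.inl ⟨⟨by omega, by omega, by omega⟩, by omega⟩), hb, pvPal_adj]
      · rw [if_neg hcond, hcell0 a b, pvCellUpto, if_neg]
        rintro (⟨⟨ht1, ht2, ht3⟩, hlt⟩ | hc)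
        · refine hcond ⟨by omega, ?_, by omega⟩
          rcases Nat.lt_or_ge (b - a) 1 with hba | hba
          · have hba' : b = a := by omega
            have : a < N := by
              rcases Nat.lt_or_ge a N with h | h
              · exact h
              · exact absurd ⟨by omega, by omega⟩ hcn
            omega
          · omega
        · exact hcn hc
  obtain ⟨hs3, hc3⟩ := outer_spec n arr N hn 2 _ (by norm_num) hs2 hc2
  have hEq : init_palindrome n arr =
      (PySem.List.pyRange 2 (n+1) 1).foldl (fun p s =>
        (PySem.List.pyRange 1 (n - s + 1) 1).foldl (fun p i =>
          pvSet2 p i (i+s)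
            (pvAnd (pvGet2 p (i+1) (i+s-1))
                   (PySem.List.pyGet? arr i == PySem.List.pyGet? arr (i+s)))) p)
        (pvSet2 ((PySem.List.pyRange 1 n 1).foldl (fun p i =>
          pvSet2 (pvSet2 p i i (some true)) i (i+1)
            (some (PySem.List.pyGet? arr i == PySem.List.pyGet? arr (i+1))))
          ((PySem.List.pyRange 0 (n+1) 1).map
            (fun _ => (PySem.List.pyRange 0 (n+1) 1).map (fun _ => (none : Option Bool)))))
          (-1) (-1) (some true)) := rfl
  rw [hEq]
  refine ⟨hs3, fun a b => ?_⟩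
  rw [hc3 a b, show n.toNat = N from by omega, pvCellUpto_top]

lemma expand_spec (n : Int) (arr : List Int) (N : Nat) (hn : n = (N : Int)) :
    ∀ (l r : Int) (p : List (List (Option Bool))), pvShape N p → l ≤ r →
      pvShape N (pvExpand n arr p l r) ∧
      ∀ a b : Nat, pvg (pvExpand n arr p l r) a b =
        if pvCov n arr l r a b then some true else pvg p a b := by
  have main : ∀ (fuel : Nat) (l r : Int) (p : List (List (Option Bool))), l.toNat ≤ fuel →
      pvShape N p → l ≤ r →
      pvShape N (pvExpand n arr p l r) ∧
      ∀ a b : Nat, pvg (pvExpand n arr p l r) a b =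
        if pvCov n arr l r a b then some true else pvg p a b := by
    intro fuel
    induction fuel with
    | zero =>
      intro l r p hfuel hp hlr
      rw [pvExpand, dif_neg (by rintro ⟨h1, h2, h3⟩; omega)]
      refine ⟨hp, fun a b => ?_⟩
      rw [if_neg]
      simp only [pvCov, Bool.and_eq_true, decide_eq_true_eq]
      rintro ⟨⟨hsum, hle⟩, hch⟩
      rw [pvChain, Bool.and_eq_true, pvG] at hch
      simp only [Bool.and_eq_true, decide_eq_true_eq] at hch
      omega
    | succ fuel ih =>
      intro l r p hfuel hp hlr
      rw [pvExpand]
      by_cases hg : 1 ≤ l ∧ r ≤ n ∧ (PySem.List.pyGet? arr l == PySem.List.pyGet? arr r) = true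
      · rw [dif_pos hg]
        have hshape' : pvShape N (pvSet2 p l r (some true)) := shape_pvSet2 _ _ _ _ hp
        obtain ⟨hS, hC⟩ := ih (l-1) (r+1) _ (by omega) hshape' (by omega)
        refine ⟨hS, fun a b => ?_⟩
        rw [hC a b]
        have hset : ∀ a b : Nat, pvg (pvSet2 p l r (some true)) a b =
            if (a : Int) = l ∧ (b : Int) = r then some true else pvg p a b := by
          intro a b
          exact g_pvSet2_int p l r (some true) (by omega) (by rw [hp.1]; omega) (by omega)
            (by rw [hp.2 l.toNat (by omega)]; omega) a b
        by_cases hcov : pvCov n arr (l-1) (r+1) a b = true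
        · rw [if_pos hcov, if_pos ?_]
          simp only [pvCov, Bool.and_eq_true, decide_eq_true_eq] at hcov ⊢
          obtain ⟨⟨hsum, hle⟩, hchain⟩ := hcov
          refine ⟨⟨by omega, by omega⟩, ?_⟩
          rw [show (l - (a : Int)).toNat + 1 = ((l - 1 - (a : Int)).toNat + 1) + 1 from by omega,
            pvChain, Bool.and_eq_true]
          exact ⟨by simp [pvG, hg.1, hg.2.1, hg.2.2], hchain⟩
        · rw [if_neg hcov, hset a b]
          by_cases hab : (a : Int) = l ∧ (b : Int) = r
          · rw [if_pos hab, if_pos ?_]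
            simp only [pvCov, Bool.and_eq_true, decide_eq_true_eq]
            refine ⟨⟨by omega, by omega⟩, ?_⟩
            rw [show (l - (a : Int)).toNat + 1 = 1 from by omega, pvChain]
            simp [pvG, hg.1, hg.2.1, hg.2.2, pvChain]
          · rw [if_neg hab, if_neg ?_]
            intro hC2
            simp only [pvCov, Bool.and_eq_true, decide_eq_true_eq] at hC2 hcov
            obtain ⟨⟨hsum, hle⟩, hch⟩ := hC2
            by_cases hal : (a : Int) = l
            · exact hab ⟨hal, by omega⟩
            · refine hcov ⟨⟨by omega, by omega⟩, ?_⟩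
              rw [show (l - (a : Int)).toNat + 1 = ((l - 1 - (a : Int)).toNat + 1) + 1 from by omega,
                pvChain, Bool.and_eq_true] at hch
              exact hch.2
      · rw [dif_neg hg]
        refine ⟨hp, fun a b => ?_⟩
        rw [if_neg]
        simp only [pvCov, Bool.and_eq_true, decide_eq_true_eq]
        rintro ⟨⟨hsum, hle⟩, hch⟩
        rw [pvChain, Bool.and_eq_true, pvG] at hch
        simp only [Bool.and_eq_true, decide_eq_true_eq] at hch
        exact hg ⟨hch.1.1.1, hch.1.1.2, hch.1.2⟩
  intro l r p hp hlr
  exact main l.toNat l r p (le_refl _) hp hlr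

lemma centers_spec (n : Int) (arr : List Int) (N : Nat) (hn : n = (N : Int)) :
    ∀ (k : Int) (p : List (List (Option Bool))), pvShape N p →
      pvShape N ((PySem.List.pyRange k (n+1) 1).foldl (fun p c =>
        pvExpand n arr (pvExpand n arr p c c) c (c+1)) p) ∧
      ∀ a b : Nat, pvg ((PySem.List.pyRange k (n+1) 1).foldl (fun p c =>
        pvExpand n arr (pvExpand n arr p c c) c (c+1)) p) a b =
        if (PySem.List.pyRange k (n+1) 1).any (fun c => pvCovC n arr c a b) then some true
        else pvg p a b := by
  intro k p
  induction hm : (n + 1 - k).toNat using Nat.strong_induction_on generalizing k p with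
  | _ m ih =>
  intro hp
  by_cases hkn : n + 1 ≤ k
  · rw [PySem.List.pyRange_one_eq_nil hkn]
    refine ⟨hp, fun a b => ?_⟩
    rw [List.foldl_nil, List.any_nil, if_neg (by simp)]
  · have hkn' : k < n + 1 := lt_of_not_ge hkn
    rw [PySem.List.pyRange_one_cons hkn', List.foldl_cons]
    obtain ⟨hs1, hc1⟩ := expand_spec n arr N hn k k p hp (le_refl k)
    obtain ⟨hs2, hc2⟩ := expand_spec n arr N hn k (k+1) _ hs1 (by omega)
    obtain ⟨hsF, hcF⟩ := ih (n + 1 - (k+1)).toNat (by omega) (k+1) _ rfl hs2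
    refine ⟨hsF, fun a b => ?_⟩
    rw [hcF a b, hc2 a b, hc1 a b, List.any_cons]
    simp only [pvCovC]
    rcases Bool.eq_false_or_eq_true (pvCov n arr k (k+1) a b) with h1 | h1 <;>
      rcases Bool.eq_false_or_eq_true (pvCov n arr k k a b) with h2 | h2 <;>
        simp only [h1, h2, Bool.false_or, Bool.true_or, Bool.or_true, Bool.or_false] <;> simp

lemma cov_bounds (n : Int) (arr : List Int) (l r : Int) (a b : Nat) (hlr : l ≤ r) (hrl : r ≤ l + 1)
    (h : pvCov n arr l r a b = true) : 1 ≤ a ∧ a ≤ b ∧ (b : Int) ≤ n := by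
  simp only [pvCov, Bool.and_eq_true, decide_eq_true_eq] at h
  obtain ⟨⟨hsum, hle⟩, hch⟩ := h
  have hG := (pvChain_iff n arr l r _).mp hch ((l - (a : Int)).toNat) (by omega)
  rw [show ((l - (a : Int)).toNat : Int) = l - (a : Int) from by omega,
    show l - (l - (a : Int)) = (a : Int) from by ring,
    show r + (l - (a : Int)) = (b : Int) from by omega, pvG] at hG
  simp only [Bool.and_eq_true, decide_eq_true_eq] at hG
  refine ⟨by omega, by omega, by omega⟩

lemma cov_pairs (n : Int) (arr : List Int) (l r : Int) (a b : Nat) (hlr : l ≤ r) (hrl : r ≤ l + 1)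
    (h : pvCov n arr l r a b = true) :
    ∀ u v : Nat, a ≤ u → u ≤ v → u + v = a + b →
      (PySem.List.pyGet? arr (u : Int) == PySem.List.pyGet? arr (v : Int)) = true := by
  simp only [pvCov, Bool.and_eq_true, decide_eq_true_eq] at h
  obtain ⟨⟨hsum, hle⟩, hch⟩ := h
  intro u v hu huv hsum2
  have huc : (u : Int) ≤ l := by omega
  have hG := (pvChain_iff n arr l r _).mp hch ((l - (u : Int)).toNat) (by omega)
  rw [show ((l - (u : Int)).toNat : Int) = l - (u : Int) from by omega,
    show l - (l - (u : Int)) = (u : Int) from by ring,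
    show r + (l - (u : Int)) = (v : Int) from by omega, pvG] at hG
  simp only [Bool.and_eq_true, decide_eq_true_eq] at hG
  exact hG.2

lemma any_cov_eq_pal (n : Int) (arr : List Int) (N : Nat) (hn : n = (N : Int))
    (a b : Nat) (ha : 1 ≤ a) (hab : a ≤ b) (hb : b ≤ N) :
    (PySem.List.pyRange 1 (n+1) 1).any (fun c => pvCovC n arr c a b) = pvPal arr a b := by
  cases hpal : pvPal arr a b with
  | true =>
    have hpairs := (pvPal_pairs arr a b).mp hpal
    rw [List.any_eq_true]
    refine of_eq_true (eq_true ?_)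
    refine ⟨(((a + b) / 2 : Nat) : Int), ?_, ?_⟩
    · rw [PySem.List.mem_pyRange_one]
      omega
    · rw [pvCovC, Bool.or_eq_true]
      by_cases hpar : (a + b) % 2 = 0
      · refine Or.inr ?_
        simp only [pvCov, Bool.and_eq_true, decide_eq_true_eq]
        refine ⟨⟨by omega, by omega⟩, ?_⟩
        rw [pvChain_iff]
        intro t ht
        rw [pvG]
        simp only [Bool.and_eq_true, decide_eq_true_eq]
        refine ⟨⟨by omega, by omega⟩, ?_⟩
        have hq := hpairs ((((a + b) / 2 : Nat) : Int) - t).toNat ((((a + b) / 2 : Nat) : Int) + t).toNat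
          (by omega) (by omega) (by omega) (by omega)
        rwa [show (((((a + b) / 2 : Nat) : Int) - t).toNat : Int) = (((a + b) / 2 : Nat) : Int) - t from by omega,
          show (((((a + b) / 2 : Nat) : Int) + t).toNat : Int) = (((a + b) / 2 : Nat) : Int) + t from by omega] at hq
      · refine Or.inl ?_
        simp only [pvCov, Bool.and_eq_true, decide_eq_true_eq]
        refine ⟨⟨by omega, by omega⟩, ?_⟩
        rw [pvChain_iff]
        intro t ht
        rw [pvG]
        simp only [Bool.and_eq_true, decide_eq_true_eq]
        refine ⟨⟨by omega, by omega⟩, ?_⟩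
        have hq := hpairs ((((a + b) / 2 : Nat) : Int) - t).toNat ((((a + b) / 2 : Nat) : Int) + 1 + t).toNat
          (by omega) (by omega) (by omega) (by omega)
        rwa [show (((((a + b) / 2 : Nat) : Int) - t).toNat : Int) = (((a + b) / 2 : Nat) : Int) - t from by omega,
          show (((((a + b) / 2 : Nat) : Int) + 1 + t).toNat : Int) = (((a + b) / 2 : Nat) : Int) + 1 + t from by omega] at hq
  | false =>
    by_contra hany
    rw [Bool.not_eq_false, List.any_eq_true] at hany
    obtain ⟨c, hmem, hcov⟩ := hany
    rw [pvCovC, Bool.or_eq_true] at hcov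
    have hpairs : ∀ u v : Nat, a ≤ u → u ≤ v → v ≤ b → u + v = a + b →
        (PySem.List.pyGet? arr (u : Int) == PySem.List.pyGet? arr (v : Int)) = true := by
      rcases hcov with hcov | hcov
      · exact fun u v hu huv _ hsum => cov_pairs n arr c (c+1) a b (by omega) (by omega) hcov u v hu huv hsum
      · exact fun u v hu huv _ hsum => cov_pairs n arr c c a b (le_refl c) (by omega) hcov u v hu huv hsum
    rw [(pvPal_pairs arr a b).mpr (fun u v hu huv hv hsum => hpairs u v hu huv hv hsum)] at hpal
    exact absurd hpal (by simp)

lemma getD_replicate' {α : Type} (m : Nat) (x d : α) (b : Nat) :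
    (List.replicate m x).getD b d = if b < m then x else d := by
  rw [List.getD_eq_getElem?_getD]
  by_cases h : b < m
  · rw [List.getElem?_eq_getElem (by simpa using h), if_pos h]
    simp
  · rw [List.getElem?_eq_none (by simpa using h), if_neg h]
    rfl

lemma getD_replicate_append {α : Type} (m1 m2 : Nat) (x y d : α) (b : Nat) :
    ((List.replicate m1 x ++ List.replicate m2 y).getD b d) =
      if b < m1 then x else if b < m1 + m2 then y else d := by
  rw [List.getD_eq_getElem?_getD]
  by_cases h1 : b < m1
  · rw [List.getElem?_append_left (by simpa using h1), List.getElem?_eq_getElem (by simpa using h1),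
      if_pos h1]
    simp
  · by_cases h2 : b < m1 + m2
    · rw [List.getElem?_append_right (by simp; omega), List.length_replicate,
        List.getElem?_eq_getElem (by simp; omega), if_neg h1, if_pos h2]
      simp
    · rw [List.getElem?_eq_none (by simp; omega), if_neg h1, if_neg h2]
      rfl

lemma B_cells (n : Int) (arr : List Int) (N : Nat) (hn : n = (N : Int)) (hN : 1 ≤ N) :
    pvShape N (init_palindrome_alt n arr) ∧
    ∀ a b : Nat, pvg (init_palindrome_alt n arr) a b = pvCell arr N a b := by
  have hshape0 : pvShape N ([List.replicate (n+1).toNat (none : Option Bool)] ++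
      (PySem.List.pyRange 1 (n+1) 1).map (fun i =>
        List.replicate i.toNat (none : Option Bool) ++ List.replicate (n - i + 1).toNat (some false))) := by
    constructor
    · simp [PySem.List.length_pyRange_one]
      omega
    · intro k hk
      cases k with
      | zero =>
        show (List.replicate (n+1).toNat (none : Option Bool)).length = N + 1
        simp
        omega
      | succ k' =>
        show (((PySem.List.pyRange 1 (n+1) 1).map (fun i =>
          List.replicate i.toNat (none : Option Bool) ++
            List.replicate (n - i + 1).toNat (some false))).getD k' []).length = N + 1
        have hk' : k' < (PySem.List.pyRange 1 (n+1) 1).length := by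
          rw [PySem.List.length_pyRange_one]
          omega
        rw [List.getD_eq_getElem?_getD, List.getElem?_map, List.getElem?_eq_getElem hk',
          PySem.List.getElem_pyRange_one]
        simp
        omega
  have hcell0 : ∀ a b : Nat, pvg ([List.replicate (n+1).toNat (none : Option Bool)] ++
      (PySem.List.pyRange 1 (n+1) 1).map (fun i =>
        List.replicate i.toNat (none : Option Bool) ++ List.replicate (n - i + 1).toNat (some false))) a b =
      if 1 ≤ a ∧ a ≤ b ∧ b ≤ N then some false else none := by
    intro a b
    rw [pvg]
    cases a with
    | zero =>
      show ((List.replicate (n+1).toNat (none : Option Bool)).getD b none) = _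
      rw [getD_replicate']
      split_ifs <;> first | rfl | omega
    | succ a' =>
      show (((PySem.List.pyRange 1 (n+1) 1).map (fun i =>
        List.replicate i.toNat (none : Option Bool) ++
          List.replicate (n - i + 1).toNat (some false))).getD a' []).getD b none = _
      by_cases ha' : a' < (PySem.List.pyRange 1 (n+1) 1).length
      · have hlenpr : (PySem.List.pyRange 1 (n+1) 1).length = N := by
          rw [PySem.List.length_pyRange_one]
          omega
        have hrow : ((PySem.List.pyRange 1 (n+1) 1).map (fun i =>
            List.replicate i.toNat (none : Option Bool) ++
              List.replicate (n - i + 1).toNat (some false))).getD a' [] =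
            List.replicate ((1 : Int) + (a' : Int)).toNat (none : Option Bool) ++
              List.replicate (n - ((1 : Int) + (a' : Int)) + 1).toNat (some false) := by
          rw [List.getD_eq_getElem?_getD, List.getElem?_map, List.getElem?_eq_getElem ha',
            PySem.List.getElem_pyRange_one]
          rfl
        rw [hrow, getD_replicate_append]
        by_cases hb1 : b < ((1 : Int) + (a' : Int)).toNat
        · rw [if_pos hb1, if_neg (by omega)]
        · rw [if_neg hb1]
          by_cases hb2 : b < ((1 : Int) + (a' : Int)).toNat + (n - ((1 : Int) + (a' : Int)) + 1).toNat
          · rw [if_pos hb2, if_pos (by omega)]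
          · rw [if_neg hb2, if_neg (by omega)]
      · have hrow : ((PySem.List.pyRange 1 (n+1) 1).map (fun i =>
            List.replicate i.toNat (none : Option Bool) ++
              List.replicate (n - i + 1).toNat (some false))).getD a' [] = ([] : List (Option Bool)) := by
          rw [List.getD_eq_getElem?_getD, List.getElem?_map, List.getElem?_eq_none (by omega)]
          rfl
        rw [PySem.List.length_pyRange_one] at ha'
        rw [hrow, if_neg (by omega)]
        rfl
  obtain ⟨hsC, hcC⟩ := centers_spec n arr N hn 1 _ hshape0
  have hEq : init_palindrome_alt n arr =
      pvSet2 ((PySem.List.pyRange 1 (n+1) 1).foldl (fun p c =>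
        pvExpand n arr (pvExpand n arr p c c) c (c+1))
        ([List.replicate (n+1).toNat (none : Option Bool)] ++
          (PySem.List.pyRange 1 (n+1) 1).map (fun i =>
            List.replicate i.toNat (none : Option Bool) ++ List.replicate (n - i + 1).toNat (some false))))
        (-1) (-1) (some true) := rfl
  rw [hEq]
  refine ⟨shape_pvSet2 _ _ _ _ hsC, fun a b => ?_⟩
  rw [corner_pvSet2 _ hsC a b]
  by_cases hcn : a = N ∧ b = N
  · rw [if_pos hcn, pvCell, if_pos (Or.inr hcn), hcn.1, hcn.2, pvPal_self]
  · rw [if_neg hcn, hcC a b, hcell0 a b]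
    by_cases htri : 1 ≤ a ∧ a ≤ b ∧ b ≤ N
    · rw [any_cov_eq_pal n arr N hn a b htri.1 htri.2.1 htri.2.2]
      rcases Bool.eq_false_or_eq_true (pvPal arr a b) with hpal | hpal
      · rw [if_pos hpal, pvCell, if_pos (Or.inl htri), hpal]
      · rw [if_neg (by simp [hpal]), if_pos htri, pvCell, if_pos (Or.inl htri), hpal]
    · have hanyF : ((PySem.List.pyRange 1 (n+1) 1).any fun c => pvCovC n arr c a b) = false := by
        by_contra hx
        rw [Bool.not_eq_false, List.any_eq_true] at hx
        obtain ⟨c, hmem, hcov⟩ := hx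
        rw [pvCovC, Bool.or_eq_true] at hcov
        rcases hcov with hcov | hcov
        · obtain ⟨hb1, hb2, hb3⟩ := cov_bounds n arr c (c+1) a b (by omega) (by omega) hcov
          exact htri ⟨hb1, hb2, by omega⟩
        · obtain ⟨hb1, hb2, hb3⟩ := cov_bounds n arr c c a b (le_refl c) (by omega) hcov
          exact htri ⟨hb1, hb2, by omega⟩
      rw [hanyF, if_neg (by simp), if_neg htri, pvCell,
        if_neg (by rintro (h | h); exacts [htri h, hcn h])]

lemma mat_ext {N : Nat} (P Q : List (List (Option Bool))) (hP : pvShape N P) (hQ : pvShape N Q)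
    (h : ∀ a b : Nat, pvg P a b = pvg Q a b) : P = Q := by
  have hlen : P.length = Q.length := by rw [hP.1, hQ.1]
  refine List.ext_getElem hlen ?_
  intro k hk1 hk2
  have hrowP : P.getD k [] = P[k] := by
    rw [List.getD_eq_getElem?_getD, List.getElem?_eq_getElem hk1]
    rfl
  have hrowQ : Q.getD k [] = Q[k] := by
    rw [List.getD_eq_getElem?_getD, List.getElem?_eq_getElem hk2]
    rfl
  have hlenrow : P[k].length = Q[k].length := by
    rw [← hrowP, ← hrowQ, hP.2 k (by rw [← hP.1]; omega), hQ.2 k (by rw [← hQ.1]; omega)]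
  refine List.ext_getElem hlenrow ?_
  intro m hm1 hm2
  have hc := h k m
  rw [pvg, pvg, hrowP, hrowQ, List.getD_eq_getElem?_getD, List.getD_eq_getElem?_getD,
    List.getElem?_eq_getElem hm1, List.getElem?_eq_getElem hm2] at hc
  simpa using hc

-- ===== VERDICT (by name: the statement is the Claim_ definition above) =====
theorem init_palindrome_spec : Claim_equal_init_palindrome := by
  intro n arr _hdom hpre
  unfold Spec_init_palindrome
  obtain ⟨hn0, hrest⟩ := hpre
  by_cases h0 : n = 0
  · subst h0; rfl
  · have hN : 1 ≤ n.toNat := by omega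
    have hn : n = (n.toNat : Int) := by omega
    obtain ⟨hsA, hcA⟩ := A_cells n arr n.toNat hn hN
    obtain ⟨hsB, hcB⟩ := B_cells n arr n.toNat hn hN
    exact mat_ext _ _ hsA hsB (fun a b => by rw [hcA, hcB])
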